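-- pv_equiv track=rewrite | github.com/lixiang2017/leetcode | leetcode-cn/lcp/LCP_22._黑白方格画.py | paintingPlan
-- ===== SOURCE A (Python) =====
-- def paintingPlan(n, k):
--     """
--     :type n: int
--     :type k: int
--     :rtype: int
--     """
--     if k < 0 or k > n * n: return 0
--     if k == n * n or k == 0: return 1
--     # combinations
--     C = [[1] * (n + 1) for _ in range(n + 1)]
--     for i in range(n):
--         for j in range(i):
--             C[i + 1][j + 1] = C[i][j] + C[i][j + 1]
--
--     # enumerate
--     plan = 0
--     for i in range(n + 1):
--         for j in range(n + 1):
--             if i * n + j * n - i * j == k: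
--                 plan += C[n][i] * C[n][j]
--
--     return plan
-- ===== SOURCE B (Python) =====
-- def paintingPlan(n, k):
--     if k < 0 or k > n * n:
--         return 0
--     if k == n * n or k == 0:
--         return 1
--     # one row of binomials: row[m] = C(n, m), built multiplicatively in O(n)
--     row = [1]
--     c = 1
--     for m in range(1, n + 1):
--         c = c * (n - m + 1) // m
--         row.append(c)
--     # for each i < n solve j directly from i*n + j*n - i*j == k
--     total = 0
--     for i in range(n):
--         r = k - i * n
--         d = n - i
--         if r % d == 0 and 0 <= r // d <= n:
--             total += row[i] * row[r // d]
--     return total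
-- ===== Notes on version B (the rewrite author's own statement) =====
-- stated objective: faster
-- what changed: Replaces the O(n^2) Pascal-triangle table and the O(n^2) double enumeration of (i,j) with a single O(n) multiplicative binomial row and, for each i, solving j directly from the linear constraint i*n + j*n - i*j = k.
import Mathlib
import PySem

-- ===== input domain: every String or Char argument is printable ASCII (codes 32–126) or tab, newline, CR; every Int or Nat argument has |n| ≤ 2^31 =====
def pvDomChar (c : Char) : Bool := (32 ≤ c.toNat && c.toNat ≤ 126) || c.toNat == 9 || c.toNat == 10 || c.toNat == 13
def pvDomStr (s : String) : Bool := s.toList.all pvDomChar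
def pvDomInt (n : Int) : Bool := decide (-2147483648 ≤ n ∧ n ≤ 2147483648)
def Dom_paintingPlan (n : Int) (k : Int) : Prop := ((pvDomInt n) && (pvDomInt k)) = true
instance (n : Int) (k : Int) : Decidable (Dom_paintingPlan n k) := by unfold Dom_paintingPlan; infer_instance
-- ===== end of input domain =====

-- B replaces A's O(n^2) Pascal table and O(n^2) double enumeration by one O(n)
-- multiplicative binomial row and a direct solve for j from the constraint (objective: faster).

-- ===== PORT A =====
-- the Pascal-triangle table C (writes C[i+1][j+1] use List.set on nonnegative in-range indices, exact here)
def pvTableA (n : Int) : List (List Int) :=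
  (PySem.List.pyRange 0 n 1).foldl (fun C i =>
    (PySem.List.pyRange 0 i 1).foldl (fun C j =>
      C.set (i+1).toNat ((C.getD (i+1).toNat []).set (j+1).toNat
        (PySem.List.pyGetD (PySem.List.pyGetD C i []) j 0
          + PySem.List.pyGetD (PySem.List.pyGetD C i []) (j+1) 0))) C)
    (List.replicate (n+1).toNat (List.replicate (n+1).toNat (1:Int)))

def paintingPlan (n : Int) (k : Int) : Int :=
  if k < 0 ∨ n * n < k then 0
  else if k = n * n ∨ k = 0 then 1
  else
    let C := pvTableA n
    (PySem.List.pyRange 0 (n+1) 1).foldl (fun plan i =>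
      (PySem.List.pyRange 0 (n+1) 1).foldl (fun plan j =>
        if i * n + j * n - i * j = k then
          plan + PySem.List.pyGetD (PySem.List.pyGetD C n []) i 0
               * PySem.List.pyGetD (PySem.List.pyGetD C n []) j 0
        else plan) plan) 0

-- ===== PORT B =====
-- one row of binomials row[m] = C(n, m), built multiplicatively
def pvRowB (n : Int) : List Int :=
  ((PySem.List.pyRange 1 (n+1) 1).foldl (fun (p : List Int × Int) m =>
      let c := PySem.Int.floordiv (p.2 * (n - m + 1)) m
      (p.1 ++ [c], c)) ([1], 1)).1

def paintingPlan_alt (n : Int) (k : Int) : Int :=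
  if k < 0 ∨ n * n < k then 0
  else if k = n * n ∨ k = 0 then 1
  else
    let row := pvRowB n
    (PySem.List.pyRange 0 n 1).foldl (fun total i =>
      let r := k - i * n
      let d := n - i
      if PySem.Int.mod r d = 0 ∧ 0 ≤ PySem.Int.floordiv r d ∧ PySem.Int.floordiv r d ≤ n then
        total + PySem.List.pyGetD row i 0 * PySem.List.pyGetD row (PySem.Int.floordiv r d) 0
      else total) 0

-- ===== PRECONDITION & SPEC =====
def Spec_paintingPlan (n : Int) (k : Int) (out : Int) : Prop := out = paintingPlan_alt n k
instance (n : Int) (k : Int) (out : Int) : Decidable (Spec_paintingPlan n k out) := by unfold Spec_paintingPlan; infer_instance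

-- ===== CLAIM (what is proved, stated in full; the proofs are below) =====
def Claim_equal_paintingPlan : Prop := ∀ (n : Int) (k : Int), Dom_paintingPlan n k → Spec_paintingPlan n k (paintingPlan n k)

-- ===== LEMMAS AND PROOFS =====

-- binomials as integers
def binI (a b : Nat) : Int := (a.choose b : Int)

-- spec of A's table after processing outer rows 0..m-1 and, in row m+1, inner columns 1..t
def tblE (m t a b : Nat) : Int :=
  if a ≤ m then (if b ≤ a then binI a b else 1)
  else if a = m + 1 ∧ 1 ≤ b ∧ b ≤ t then binI a b else 1

def tbl (N m t : Nat) : List (List Int) :=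
  (List.range (N+1)).map (fun a => (List.range (N+1)).map (tblE m t a))

lemma set_map_range {α : Type} (f : Nat → α) (x p : Nat) (v : α) :
    ((List.range x).map f).set p v = (List.range x).map (fun b => if b = p then v else f b) := by
  apply List.ext_getElem
  · simp only [List.length_set, List.length_map, List.length_range]
  · intro i hi hi2
    simp only [List.getElem_set, List.getElem_map, List.getElem_range]
    split_ifs with h1 h2 h2 <;> first | rfl | omega

lemma tblE_zero (a b : Nat) : tblE 0 0 a b = 1 := by
  unfold tblE
  split_ifs with h1 h2 h3
  · have ha : a = 0 := by omega
    have hb : b = 0 := by omega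
    subst ha; subst hb; simp [binI]
  · rfl
  · omega
  · rfl

lemma tbl_init (N : Nat) : tbl N 0 0 = List.replicate (N+1) (List.replicate (N+1) (1:Int)) := by
  unfold tbl
  calc (List.range (N+1)).map (fun a => (List.range (N+1)).map (tblE 0 0 a))
      = (List.range (N+1)).map (fun _ => List.replicate (N+1) (1:Int)) := by
        apply List.map_congr_left
        intro a _
        rw [show tblE 0 0 a = fun _ => (1:Int) from funext (tblE_zero a)]
        simp [List.map_const']
    _ = List.replicate (N+1) (List.replicate (N+1) (1:Int)) := by
        simp [List.map_const']

lemma tblE_roll (m a b : Nat) : tblE m m a b = tblE (m+1) 0 a b := by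
  by_cases h1 : a ≤ m
  · have h1' : a ≤ m + 1 := by omega
    simp [tblE, h1, h1']
  · by_cases h2 : a = m + 1
    · subst h2
      by_cases hb : 1 ≤ b ∧ b ≤ m
      · simp [tblE, h1, hb, (by omega : b ≤ m + 1)]
      · have hcases : b = 0 ∨ b = m + 1 ∨ m + 1 < b := by omega
        unfold tblE
        rw [if_neg h1, if_neg (by omega), if_pos (le_refl (m+1))]
        rcases hcases with rfl | rfl | hbig
        · simp [binI]
        · simp [binI, Nat.choose_self]
        · rw [if_neg (by omega)]
    · unfold tblE
      split_ifs <;> first | rfl | omega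

lemma tbl_rollover (N m : Nat) : tbl N m m = tbl N (m+1) 0 := by
  unfold tbl
  apply List.map_congr_left
  intro a _
  apply List.map_congr_left
  intro b _
  exact tblE_roll m a b

lemma tbl_inner_step (N m t : Nat) (hm : m < N) (ht : t < m) :
    (tbl N m t).set ((m:Int)+1).toNat (((tbl N m t).getD ((m:Int)+1).toNat []).set ((t:Int)+1).toNat
        (PySem.List.pyGetD (PySem.List.pyGetD (tbl N m t) (m:Int) []) (t:Int) 0
          + PySem.List.pyGetD (PySem.List.pyGetD (tbl N m t) (m:Int) []) ((t:Int)+1) 0))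
      = tbl N m (t+1) := by
  have hm1 : ((m:Int)+1).toNat = m + 1 := by omega
  have ht1 : ((t:Int)+1).toNat = t + 1 := by omega
  have htc : ((t:Int)+1) = ((t+1 : Nat) : Int) := by push_cast; ring
  have hrowm : PySem.List.pyGetD (tbl N m t) (m:Int) [] = (List.range (N+1)).map (tblE m t m) := by
    rw [PySem.List.pyGetD_natCast]
    exact PySem.List.getD_map_range _ _ _ _ (by omega)
  have hread1 : PySem.List.pyGetD ((List.range (N+1)).map (tblE m t m)) (t:Int) 0 = binI m t := by
    rw [PySem.List.pyGetD_natCast, PySem.List.getD_map_range _ _ _ _ (by omega)]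
    unfold tblE
    rw [if_pos (le_refl m), if_pos (by omega : t ≤ m)]
  have hread2 : PySem.List.pyGetD ((List.range (N+1)).map (tblE m t m)) ((t:Int)+1) 0 = binI m (t+1) := by
    rw [htc, PySem.List.pyGetD_natCast, PySem.List.getD_map_range _ _ _ _ (by omega)]
    unfold tblE
    rw [if_pos (le_refl m), if_pos (by omega : t + 1 ≤ m)]
  have hrowm1 : (tbl N m t).getD (m+1) [] = (List.range (N+1)).map (tblE m t (m+1)) := by
    exact PySem.List.getD_map_range _ _ _ _ (by omega)
  have hsum : binI m t + binI m (t+1) = binI (m+1) (t+1) := by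
    unfold binI
    exact_mod_cast (Nat.choose_succ_succ m t).symm
  rw [hm1, ht1, hrowm, hread1, hread2, hrowm1, hsum, set_map_range]
  show (tbl N m t).set (m+1) _ = _
  unfold tbl
  rw [set_map_range]
  apply List.map_congr_left
  intro a ha
  rw [List.mem_range] at ha
  by_cases hA : a = m + 1
  · subst hA
    rw [if_pos rfl]
    apply List.map_congr_left
    intro b hb
    rw [List.mem_range] at hb
    by_cases hB : b = t + 1
    · subst hB
      rw [if_pos rfl]
      unfold tblE
      rw [if_neg (by omega), if_pos ⟨rfl, by omega, le_refl _⟩]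
    · rw [if_neg hB]
      unfold tblE
      split_ifs <;> first | rfl | omega
  · rw [if_neg hA]
    apply List.map_congr_left
    intro b _
    unfold tblE
    split_ifs <;> first | rfl | omega

lemma tbl_inner_aux (N m t : Nat) (hm : m < N) (ht : t ≤ m) :
    (List.range t).foldl (fun C (b : Nat) =>
      C.set ((m:Int)+1).toNat ((C.getD ((m:Int)+1).toNat []).set ((b:Int)+1).toNat
        (PySem.List.pyGetD (PySem.List.pyGetD C (m:Int) []) (b:Int) 0
          + PySem.List.pyGetD (PySem.List.pyGetD C (m:Int) []) ((b:Int)+1) 0))) (tbl N m 0)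
      = tbl N m t := by
  induction t with
  | zero => rfl
  | succ t ih =>
    rw [List.range_succ, List.foldl_append, ih (by omega)]
    exact tbl_inner_step N m t hm (by omega)

lemma tbl_inner (N m : Nat) (hm : m < N) :
    (PySem.List.pyRange 0 (m:Int) 1).foldl (fun C j =>
      C.set ((m:Int)+1).toNat ((C.getD ((m:Int)+1).toNat []).set (j+1).toNat
        (PySem.List.pyGetD (PySem.List.pyGetD C (m:Int) []) j 0
          + PySem.List.pyGetD (PySem.List.pyGetD C (m:Int) []) (j+1) 0))) (tbl N m 0)
      = tbl N (m+1) 0 := by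
  rw [PySem.List.pyRange_zero_natCast, List.foldl_map, ← tbl_rollover]
  exact tbl_inner_aux N m m hm le_rfl

lemma tbl_outer_aux (N m : Nat) (hm : m ≤ N) :
    (List.range m).foldl (fun C (a : Nat) =>
      (PySem.List.pyRange 0 (a:Int) 1).foldl (fun C j =>
        C.set ((a:Int)+1).toNat ((C.getD ((a:Int)+1).toNat []).set (j+1).toNat
          (PySem.List.pyGetD (PySem.List.pyGetD C (a:Int) []) j 0
            + PySem.List.pyGetD (PySem.List.pyGetD C (a:Int) []) (j+1) 0))) C) (tbl N 0 0)
      = tbl N m 0 := by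
  induction m with
  | zero => rfl
  | succ m ih =>
    rw [List.range_succ, List.foldl_append, ih (by omega)]
    exact tbl_inner N m (by omega)

lemma tableA_eq (N : Nat) : pvTableA (N:Int) = tbl N N 0 := by
  unfold pvTableA
  rw [PySem.List.pyRange_zero_natCast, List.foldl_map]
  have hrep : (((N:Int))+1).toNat = N + 1 := by omega
  rw [hrep, ← tbl_init]
  exact tbl_outer_aux N N le_rfl

lemma rowB_aux (N t : Nat) (ht : t ≤ N) :
    (PySem.List.pyRange 1 ((t:Int)+1) 1).foldl (fun (p : List Int × Int) m =>
        let c := PySem.Int.floordiv (p.2 * ((N:Int) - m + 1)) m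
        (p.1 ++ [c], c)) ([1], 1)
      = ((List.range (t+1)).map (fun m => binI N m), binI N t) := by
  induction t with
  | zero =>
    rw [PySem.List.pyRange_one_eq_nil (by omega)]
    simp [binI]
  | succ t ih =>
    have hs : ((t:Int)+1)+1 = (((t+1):Nat):Int)+1 := by push_cast; ring
    rw [show (((t+1):Nat):Int) + 1 = ((t:Int)+1)+1 from by push_cast; ring,
        PySem.List.pyRange_one_succ_right (by omega), List.foldl_append, ih (by omega)]
    simp only [List.foldl_cons, List.foldl_nil]
    have hc : PySem.Int.floordiv (binI N t * ((N:Int) - ((t:Int)+1) + 1)) ((t:Int)+1)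
        = binI N (t+1) := by
      have h1 : (N:Int) - ((t:Int)+1) + 1 = ((N - t : Nat) : Int) := by omega
      have h2 : binI N t * ((N - t : Nat) : Int) = ((N.choose (t+1) * (t+1) : Nat) : Int) := by
        unfold binI
        rw [← Nat.cast_mul, Nat.choose_succ_right_eq]
      have h3 : ((t:Int)+1) = (((t+1):Nat):Int) := by push_cast; ring
      rw [h1, h2, h3, PySem.Int.floordiv_natCast, Nat.mul_div_cancel _ (Nat.succ_pos t)]
      rfl
    rw [hc]
    simp [List.range_succ]

lemma rowB_eq (N : Nat) : pvRowB (N:Int) = (List.range (N+1)).map (fun m => binI N m) := by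
  unfold pvRowB
  rw [rowB_aux N N le_rfl]

-- common value of both lookups
lemma lookupA (N : Nat) (x : Int) (h0 : 0 ≤ x) (hx : x ≤ (N:Int)) :
    PySem.List.pyGetD (PySem.List.pyGetD (pvTableA (N:Int)) (N:Int) []) x 0 = binI N x.toNat := by
  obtain ⟨y, rfl⟩ : ∃ y : Nat, x = (y:Int) := ⟨x.toNat, (Int.toNat_of_nonneg h0).symm⟩
  rw [tableA_eq, PySem.List.pyGetD_natCast, PySem.List.pyGetD_natCast]
  unfold tbl
  rw [PySem.List.getD_map_range _ _ _ _ (by omega), PySem.List.getD_map_range _ _ _ _ (by omega)]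
  unfold tblE
  rw [if_pos (le_refl N), if_pos (by omega : y ≤ N), Int.toNat_natCast]

lemma lookupB (N : Nat) (x : Int) (h0 : 0 ≤ x) (hx : x ≤ (N:Int)) :
    PySem.List.pyGetD (pvRowB (N:Int)) x 0 = binI N x.toNat := by
  obtain ⟨y, rfl⟩ : ∃ y : Nat, x = (y:Int) := ⟨x.toNat, (Int.toNat_of_nonneg h0).symm⟩
  rw [rowB_eq, PySem.List.pyGetD_natCast, PySem.List.getD_map_range _ _ _ _ (by omega),
      Int.toNat_natCast]

-- loop shape: conditional accumulation is init + sum of an ite-map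
lemma foldl_add_ite (p : Int → Prop) [DecidablePred p] (g : Int → Int) (l : List Int) (a : Int) :
    l.foldl (fun acc x => if p x then acc + g x else acc) a
      = a + (l.map (fun x => if p x then g x else 0)).sum := by
  rw [PySem.List.foldl_congr_mem l _ (fun acc x => acc + (if p x then g x else 0)) a
    (by intro acc x _; split_ifs with h <;> simp [h])]
  exact PySem.List.foldl_add l _ a

-- a nodup list sums an "ite (j = q)" map to a membership ite
lemma sum_map_ite_eq (l : List Int) (hl : l.Nodup) (q : Int) (v : Int → Int) :
    (l.map (fun j => if j = q then v j else 0)).sum = if q ∈ l then v q else 0 := by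
  rw [← List.sum_toFinset _ hl, Finset.sum_ite_eq' l.toFinset q v]
  simp

-- inner sum of A collapses to B's solved-j term (for 0 ≤ i < n)
lemma pv_inner_collapse (n k i : Int) (F : Int → Int) (_h0 : 0 ≤ i) (hi : i < n) :
    ((PySem.List.pyRange 0 (n+1) 1).map (fun j =>
        if i * n + j * n - i * j = k then F i * F j else 0)).sum
      = if PySem.Int.mod (k - i*n) (n-i) = 0 ∧ 0 ≤ PySem.Int.floordiv (k - i*n) (n-i)
            ∧ PySem.Int.floordiv (k - i*n) (n-i) ≤ n
        then F i * F (PySem.Int.floordiv (k - i*n) (n-i)) else 0 := by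
  have hd : (0:Int) < n - i := by omega
  by_cases hm : PySem.Int.mod (k - i*n) (n-i) = 0
  · have hqd := PySem.Int.floordiv_mul_add_mod (k - i*n) (n-i)
    rw [hm] at hqd
    generalize hq : PySem.Int.floordiv (k - i*n) (n-i) = q at *
    have hrq : q * (n-i) = k - i*n := by omega
    have hcond : ∀ j : Int, (i * n + j * n - i * j = k) ↔ j = q := by
      intro j
      have hjd : j * (n-i) = j * n - i * j := by ring
      constructor
      · intro h
        have hje : j * (n-i) = q * (n-i) := by omega
        exact mul_right_cancel₀ (by omega) hje
      · rintro rfl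
        omega
    rw [show ((PySem.List.pyRange 0 (n+1) 1).map (fun j =>
            if i * n + j * n - i * j = k then F i * F j else 0)).sum
          = ((PySem.List.pyRange 0 (n+1) 1).map (fun j =>
            if j = q then F i * F j else 0)).sum from
        congrArg List.sum (List.map_congr_left fun j _ => by simp only [hcond j])]
    rw [sum_map_ite_eq _ (PySem.List.nodup_pyRange_one 0 (n+1)) q (fun j => F i * F j)]
    by_cases hb : 0 ≤ q ∧ q ≤ n
    · rw [if_pos (by rw [PySem.List.mem_pyRange_one]; omega), if_pos ⟨hm, hb.1, hb.2⟩]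
    · rw [if_neg (by rw [PySem.List.mem_pyRange_one]; omega), if_neg (by tauto)]
  · have hcond : ∀ j : Int, ¬ (i * n + j * n - i * j = k) := by
      intro j h
      apply hm
      rw [PySem.Int.mod_eq_zero_iff_dvd]
      refine ⟨j, ?_⟩
      have hx : (n-i) * j = j * n - i * j := by ring
      omega
    rw [show ((PySem.List.pyRange 0 (n+1) 1).map (fun j =>
            if i * n + j * n - i * j = k then F i * F j else 0)).sum
          = ((PySem.List.pyRange 0 (n+1) 1).map (fun _ => (0:Int))).sum from
        congrArg List.sum (List.map_congr_left fun j _ => if_neg (hcond j))]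
    simp [hm]

-- at i = n the condition forces k = n*n, so the row contributes nothing
lemma pv_inner_collapse_top (n k : Int) (F : Int → Int) (hk : k ≠ n * n) :
    ((PySem.List.pyRange 0 (n+1) 1).map (fun j =>
        if n * n + j * n - n * j = k then F n * F j else 0)).sum = 0 := by
  rw [show ((PySem.List.pyRange 0 (n+1) 1).map (fun j =>
          if n * n + j * n - n * j = k then F n * F j else 0)).sum
        = ((PySem.List.pyRange 0 (n+1) 1).map (fun _ => (0:Int))).sum from
      congrArg List.sum (List.map_congr_left fun j _ => if_neg (by
        intro h
        apply hk
        have hnn : n * n + j * n - n * j = n * n := by ring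
        omega))]
  simp

-- ===== VERDICT (by name: the statement is the Claim_ definition above) =====
theorem paintingPlan_spec : Claim_equal_paintingPlan := by
  intro n k _
  show paintingPlan n k = paintingPlan_alt n k
  unfold paintingPlan paintingPlan_alt
  split_ifs with h1 h2
  · rfl
  · rfl
  · push_neg at h1 h2
    obtain ⟨hk0, hkn⟩ := h1
    obtain ⟨hkne, hkz⟩ := h2
    by_cases hn : n ≤ 0
    · have hne0 : n ≠ 0 := by
        rintro rfl
        norm_num at hkn
        omega
      rw [PySem.List.pyRange_one_eq_nil (show n + 1 ≤ 0 by omega),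
          PySem.List.pyRange_one_eq_nil (show n ≤ (0:Int) by omega)]
      rfl
    · push_neg at hn
      obtain ⟨N, rfl⟩ : ∃ N : Nat, n = (N:Int) := ⟨n.toNat, by omega⟩
      simp only []
      rw [PySem.List.foldl_congr_mem _ _ (fun plan i => plan +
            ((PySem.List.pyRange 0 ((N:Int)+1) 1).map (fun j =>
              if i * (N:Int) + j * (N:Int) - i * j = k then
                PySem.List.pyGetD (PySem.List.pyGetD (pvTableA (N:Int)) (N:Int) []) i 0
                  * PySem.List.pyGetD (PySem.List.pyGetD (pvTableA (N:Int)) (N:Int) []) j 0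
              else 0)).sum) 0
          (fun acc i _ => foldl_add_ite _ _ _ _)]
      rw [PySem.List.foldl_add]
      rw [foldl_add_ite]
      rw [show ((PySem.List.pyRange 0 ((N:Int)+1) 1).map (fun i =>
            ((PySem.List.pyRange 0 ((N:Int)+1) 1).map (fun j =>
              if i * (N:Int) + j * (N:Int) - i * j = k then
                PySem.List.pyGetD (PySem.List.pyGetD (pvTableA (N:Int)) (N:Int) []) i 0
                  * PySem.List.pyGetD (PySem.List.pyGetD (pvTableA (N:Int)) (N:Int) []) j 0
              else 0)).sum)).sum
          = ((PySem.List.pyRange 0 ((N:Int)+1) 1).map (fun i =>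
            if PySem.Int.mod (k - i*(N:Int)) ((N:Int)-i) = 0
                ∧ 0 ≤ PySem.Int.floordiv (k - i*(N:Int)) ((N:Int)-i)
                ∧ PySem.Int.floordiv (k - i*(N:Int)) ((N:Int)-i) ≤ (N:Int) then
              PySem.List.pyGetD (pvRowB (N:Int)) i 0
                * PySem.List.pyGetD (pvRowB (N:Int)) (PySem.Int.floordiv (k - i*(N:Int)) ((N:Int)-i)) 0
            else 0)).sum from
        congrArg List.sum (List.map_congr_left (fun i hi => by
          rw [PySem.List.mem_pyRange_one] at hi
          by_cases hlt : i < (N:Int)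
          · rw [pv_inner_collapse (N:Int) k i
                (fun x => PySem.List.pyGetD (PySem.List.pyGetD (pvTableA (N:Int)) (N:Int) []) x 0)
                hi.1 hlt]
            split_ifs with h1
            · rw [lookupA N i hi.1 (by omega), lookupA N _ h1.2.1 h1.2.2,
                  lookupB N i hi.1 (by omega), lookupB N _ h1.2.1 h1.2.2]
            · rfl
          · have hiN : i = (N:Int) := by omega
            subst hiN
            rw [pv_inner_collapse_top (N:Int) k
                (fun x => PySem.List.pyGetD (PySem.List.pyGetD (pvTableA (N:Int)) (N:Int) []) x 0)
                hkne, sub_self]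
            have hm0 := PySem.Int.floordiv_mul_add_mod (k - (N:Int)*(N:Int)) 0
            rw [if_neg (show ¬ _ from fun h => by omega)]))]
      rw [PySem.List.pyRange_one_succ_right (show (0:Int) ≤ (N:Int) by omega),
          List.map_append, List.sum_append]
      simp only [List.map_cons, List.map_nil, List.sum_cons, List.sum_nil]
      rw [sub_self]
      have hm0 := PySem.Int.floordiv_mul_add_mod (k - (N:Int)*(N:Int)) 0
      rw [if_neg (show ¬ _ from fun h => by omega)]
      omega
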